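-- pv_equiv track=rewrite | github.com/AISecurityAssurance/ai-sec | apps/backend/core/agents/step1_agents/loss_identification.py | _analyze_severity_distribution
-- ===== SOURCE A (Python) =====
-- from typing import Dict, Any, List, Optional
--
-- def _analyze_severity_distribution(losses: List[Dict[str, Any]]) -> Dict[str, int]:
--     """Analyze severity distribution"""
--     distribution = {
--         "catastrophic": 0,
--         "major": 0,
--         "moderate": 0,
--         "minor": 0
--     }
--
--     for loss in losses:
--         magnitude = loss['severity_classification']['magnitude']
--         if magnitude in distribution:
--             distribution[magnitude] += 1
--
--     return distribution
-- ===== SOURCE B (Python) =====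
-- from typing import Dict, Any, List, Optional
--
-- def _analyze_severity_distribution(losses: List[Dict[str, Any]]) -> Dict[str, int]:
--     """Analyze severity distribution"""
--     return {
--         key: sum(1 for loss in losses
--                  if loss['severity_classification']['magnitude'] == key)
--         for key in ("catastrophic", "major", "moderate", "minor")
--     }
-- ===== Notes on version B (the rewrite author's own statement) =====
-- stated objective: alternative
-- what changed: Replaces the single mutate-a-dict accumulation loop with a dict comprehension over the four fixed severity keys, each value computed by its own count over the losses.
import Mathlib
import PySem

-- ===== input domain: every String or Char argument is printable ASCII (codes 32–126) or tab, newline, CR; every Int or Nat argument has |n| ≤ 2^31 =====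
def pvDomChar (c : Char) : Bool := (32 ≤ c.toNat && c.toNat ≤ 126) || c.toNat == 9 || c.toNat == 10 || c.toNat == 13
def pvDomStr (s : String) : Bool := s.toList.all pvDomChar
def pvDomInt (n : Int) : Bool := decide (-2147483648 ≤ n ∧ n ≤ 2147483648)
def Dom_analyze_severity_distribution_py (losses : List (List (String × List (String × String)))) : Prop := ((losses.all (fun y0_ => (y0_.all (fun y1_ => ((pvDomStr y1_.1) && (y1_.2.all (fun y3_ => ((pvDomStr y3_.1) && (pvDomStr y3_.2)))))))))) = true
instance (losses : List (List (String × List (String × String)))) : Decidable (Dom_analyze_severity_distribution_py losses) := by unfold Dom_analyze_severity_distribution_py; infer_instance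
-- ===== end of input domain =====

-- B replaces A's single accumulate-into-dict pass by a per-category count for each of the
-- four fixed keys (alternative decomposition, same O(n) cost).
-- ===== PORT A =====
-- loss['severity_classification']['magnitude']; none = KeyError (excluded by Pre_)
def pvMagA (loss : List (String × List (String × String))) : Option String :=
  ((PySem.Dict.mk loss).get? "severity_classification").bind
    (fun sc => (PySem.Dict.mk sc).get? "magnitude")

-- loop body: if magnitude in distribution: distribution[magnitude] += 1
def pvStepA (d : PySem.Dict String Int) (loss : List (String × List (String × String))) :
    PySem.Dict String Int :=
  match pvMagA loss with
  | none => d                    -- Python raises KeyError here; such inputs are outside Pre_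
  | some mag => if d.contains mag then d.modify mag 0 (· + 1) else d

def analyze_severity_distribution_py (losses : List (List (String × List (String × String)))) : List (String × Int) :=
  (losses.foldl pvStepA
    (PySem.Dict.mk [("catastrophic", 0), ("major", 0), ("moderate", 0), ("minor", 0)])).items

-- ===== PORT B =====
-- loss['severity_classification']['magnitude']; none = KeyError (excluded by Pre_)
def pvMagB (loss : List (String × List (String × String))) : Option String :=
  ((PySem.Dict.mk loss).get? "severity_classification").bind
    (fun sc => (PySem.Dict.mk sc).get? "magnitude")

def analyze_severity_distribution_py_alt (losses : List (List (String × List (String × String)))) : List (String × Int) :=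
  ["catastrophic", "major", "moderate", "minor"].map
    (fun key => (key, (losses.countP (fun loss => pvMagB loss == some key) : Int)))

-- ===== PRECONDITION & SPEC =====
-- Pre_ excludes losses missing the 'severity_classification' or 'magnitude' key, on which the Python A raises KeyError.
def Pre_analyze_severity_distribution_py (losses : List (List (String × List (String × String)))) : Prop :=
  (losses.all (fun loss =>
    match (PySem.Dict.mk loss).get? "severity_classification" with
    | none => false
    | some sc => (PySem.Dict.mk sc).contains "magnitude")) = true
instance (losses : List (List (String × List (String × String)))) : Decidable (Pre_analyze_severity_distribution_py losses) := by unfold Pre_analyze_severity_distribution_py; infer_instance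

def pvWitness_analyze_severity_distribution_py : (List (List (String × List (String × String)))) :=
  ([[("severity_classification", [("magnitude", "major")])]])

def Spec_analyze_severity_distribution_py (losses : List (List (String × List (String × String)))) (out : List (String × Int)) : Prop := out = analyze_severity_distribution_py_alt losses
instance (losses : List (List (String × List (String × String)))) (out : List (String × Int)) : Decidable (Spec_analyze_severity_distribution_py losses out) := by unfold Spec_analyze_severity_distribution_py; infer_instance

-- ===== CLAIM (what is proved, stated in full; the proofs are below) =====
def Claim_equal_analyze_severity_distribution_py : Prop := ∀ (losses : List (List (String × List (String × String)))), Dom_analyze_severity_distribution_py losses → Pre_analyze_severity_distribution_py losses → Spec_analyze_severity_distribution_py losses (analyze_severity_distribution_py losses)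

-- ===== LEMMAS AND PROOFS =====
theorem pvMagB_eq_pvMagA : pvMagB = pvMagA := rfl

-- the keys of the distribution dict never change through the loop
theorem pvKeys_foldl (ls : List (List (String × List (String × String))))
    (d : PySem.Dict String Int) : (ls.foldl pvStepA d).keys = d.keys := by
  induction ls generalizing d with
  | nil => rfl
  | cons l ls ih =>
    simp only [List.foldl_cons]
    rw [ih]
    unfold pvStepA
    cases pvMagA l with
    | none => rfl
    | some m =>
      dsimp only
      split
      · next hc => simp [PySem.Dict.keys_insert_of_contains, hc]
      · rfl

-- a contained key's counter grows by exactly the number of losses whose magnitude equals it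
theorem pvGetD_foldl (ls : List (List (String × List (String × String))))
    (d : PySem.Dict String Int) (k : String) (hk : d.contains k = true) :
    (ls.foldl pvStepA d).getD k 0
      = d.getD k 0 + (ls.countP (fun l => pvMagA l == some k) : Int) := by
  induction ls generalizing d with
  | nil => simp
  | cons l ls ih =>
    simp only [List.foldl_cons, List.countP_cons]
    cases hm : pvMagA l with
    | none =>
      have hstep : pvStepA d l = d := by unfold pvStepA; rw [hm]
      rw [hstep, ih d hk]
      simp
    | some m =>
      by_cases hc : d.contains m = true
      · have hstep : pvStepA d l = d.modify m 0 (· + 1) := by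
          unfold pvStepA; rw [hm]; exact if_pos hc
        rw [hstep, ih _ (by simp [PySem.Dict.contains_modify, hk]),
            PySem.Dict.getD_modify]
        by_cases hmk : k = m
        · subst hmk
          simp
          ring
        · rw [if_neg hmk]
          have hne : m ≠ k := fun h => hmk h.symm
          simp [hne]
      · have hstep : pvStepA d l = d := by
          unfold pvStepA; rw [hm]; exact if_neg hc
        rw [hstep, ih d hk]
        have hne : m ≠ k := by intro h; subst h; exact hc hk
        simp [hne]

-- ===== VERDICT (by name: the statement is the Claim_ definition above) =====
theorem analyze_severity_distribution_py_spec : Claim_equal_analyze_severity_distribution_py := by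
  intro losses _ _
  unfold Spec_analyze_severity_distribution_py
  unfold analyze_severity_distribution_py analyze_severity_distribution_py_alt
  set d0 : PySem.Dict String Int :=
    PySem.Dict.mk [("catastrophic", 0), ("major", 0), ("moderate", 0), ("minor", 0)] with hd0
  have hkeys : (losses.foldl pvStepA d0).keys = d0.keys := pvKeys_foldl losses d0
  have hnd : (losses.foldl pvStepA d0).keys.Nodup := by rw [hkeys, hd0]; decide
  rw [PySem.Dict.items_eq_map_keys _ hnd 0, hkeys]
  have hk0 : d0.keys = ["catastrophic", "major", "moderate", "minor"] := by rw [hd0]; decide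
  rw [hk0]
  simp only [List.map_cons, List.map_nil, pvMagB_eq_pvMagA]
  have hget : ∀ k ∈ (["catastrophic", "major", "moderate", "minor"] : List String),
      (losses.foldl pvStepA d0).getD k 0
        = (losses.countP (fun l => pvMagA l == some k) : Int) := by
    intro k hkmem
    have hk : d0.contains k = true := by
      fin_cases hkmem <;> (rw [hd0]; decide)
    have h0 : d0.getD k 0 = 0 := by
      fin_cases hkmem <;> (rw [hd0]; decide)
    rw [pvGetD_foldl losses d0 k hk, h0, zero_add]
  rw [hget "catastrophic" (by decide), hget "major" (by decide),
      hget "moderate" (by decide), hget "minor" (by decide)]
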